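-- pv_equiv track=rewrite | github.com/turing95/trees | test.py | deletion_distance
-- ===== SOURCE A (Python) =====
-- def deletion_distance(str1, str2):
--     m, n = len(str1), len(str2)
--     dp = [[0 for _ in range(n+1)] for _ in range(m+1)]
--     for i in range(m+1):
--         for j in range(n+1):
--             if i == 0:
--                 dp[i][j] = sum(ord(c) for c in str2[:j])
--             elif j == 0:
--                 dp[i][j] = sum(ord(c) for c in str1[:i])
--             elif str1[i-1] == str2[j-1]:
--                 dp[i][j] = dp[i-1][j-1]
--             else:
--                 dp[i][j] = min(dp[i-1][j] + ord(str1[i-1]), dp[i][j-1] + ord(str2[j-1]))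
--     return dp[m][n]
-- ===== SOURCE B (Python) =====
-- def deletion_distance(str1, str2):
--     # Weighted-LCS complement: deletion distance = total char-code sum of both
--     # strings minus twice the maximum-weight common subsequence.
--     best = [0] * (len(str2) + 1)
--     for c1 in str1:
--         a = ord(c1)
--         cur = [0]
--         for j, c2 in enumerate(str2):
--             cur.append(best[j] + a if c1 == c2 else max(best[j + 1], cur[j]))
--         best = cur
--     return sum(map(ord, str1)) + sum(map(ord, str2)) - 2 * best[-1]
-- ===== Notes on version B (the rewrite author's own statement) =====
-- stated objective: faster
-- what changed: Instead of A's min-deletion-cost DP with per-cell prefix re-summing over a full table, B computes the maximum-weight common subsequence with a rolling max-DP row and returns total char-code sum of both strings minus twice that weight.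
import Mathlib
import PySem

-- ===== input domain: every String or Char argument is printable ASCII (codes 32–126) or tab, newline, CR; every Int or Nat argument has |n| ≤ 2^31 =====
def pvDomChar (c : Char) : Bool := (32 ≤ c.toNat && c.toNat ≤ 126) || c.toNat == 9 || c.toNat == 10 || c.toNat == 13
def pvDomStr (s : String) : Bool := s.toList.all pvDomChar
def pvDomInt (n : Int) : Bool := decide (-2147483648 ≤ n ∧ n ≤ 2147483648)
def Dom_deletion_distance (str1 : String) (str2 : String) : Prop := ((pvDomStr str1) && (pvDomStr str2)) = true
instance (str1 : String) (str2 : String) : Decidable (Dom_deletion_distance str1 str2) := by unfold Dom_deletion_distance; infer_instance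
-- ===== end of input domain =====

-- B replaces A's min-deletion-cost table by the complementary algorithm: it computes the
-- maximum-weight common subsequence with a rolling row and subtracts twice its weight
-- from the total char-code sum of both strings (alternative algorithm, same value).

-- ===== PORT A =====
-- sum(ord(c) for c in cs)
def ordSum (cs : List Char) : Int := (cs.map (fun c => (c.toNat : Int))).sum

-- the right-hand side assigned to dp[i][j] in A's loop body
def ddA_val (cs1 cs2 : List Char) (dp : List (List Int)) (i j : Int) : Int :=
  if i = 0 then ordSum (PySem.List.slice cs2 none (some j))
  else if j = 0 then ordSum (PySem.List.slice cs1 none (some i))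
  else if PySem.List.pyGetD cs1 (i-1) ' ' = PySem.List.pyGetD cs2 (j-1) ' ' then
    PySem.List.pyGetD (PySem.List.pyGetD dp (i-1) []) (j-1) 0
  else
    min (PySem.List.pyGetD (PySem.List.pyGetD dp (i-1) []) j 0 + ((PySem.List.pyGetD cs1 (i-1) ' ').toNat : Int))
        (PySem.List.pyGetD (PySem.List.pyGetD dp i []) (j-1) 0 + ((PySem.List.pyGetD cs2 (j-1) ' ').toNat : Int))

def deletion_distance (str1 : String) (str2 : String) : Int :=
  let cs1 := str1.toList
  let cs2 := str2.toList
  let m : Int := (cs1.length : Int)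
  let n : Int := (cs2.length : Int)
  let dp0 : List (List Int) :=
    (PySem.List.pyRange 0 (m+1) 1).map (fun _ => (PySem.List.pyRange 0 (n+1) 1).map (fun _ => (0 : Int)))
  let dp := (PySem.List.pyRange 0 (m+1) 1).foldl (fun dp i =>
    (PySem.List.pyRange 0 (n+1) 1).foldl (fun dp j =>
      PySem.List.pySetD dp i (PySem.List.pySetD (PySem.List.pyGetD dp i []) j (ddA_val cs1 cs2 dp i j))) dp) dp0
  PySem.List.pyGetD (PySem.List.pyGetD dp m []) n 0

-- ===== PORT B =====
def deletion_distance_alt (str1 : String) (str2 : String) : Int :=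
  let cs1 := str1.toList
  let cs2 := str2.toList
  let best0 : List Int := List.replicate (cs2.length + 1) 0
  let best := cs1.foldl (fun best c1 =>
    let a : Int := (c1.toNat : Int)
    (PySem.List.enumerate cs2 0).foldl (fun (cur : List Int) x =>
      cur ++ [if c1 = x.2 then PySem.List.pyGetD best x.1 0 + a
              else max (PySem.List.pyGetD best (x.1 + 1) 0) (PySem.List.pyGetD cur x.1 0)])
      [0]) best0
  ordSum cs1 + ordSum cs2 - 2 * PySem.List.pyGetD best (-1) 0

-- ===== PRECONDITION & SPEC =====
def Spec_deletion_distance (str1 : String) (str2 : String) (out : Int) : Prop := out = deletion_distance_alt str1 str2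
instance (str1 : String) (str2 : String) (out : Int) : Decidable (Spec_deletion_distance str1 str2 out) := by unfold Spec_deletion_distance; infer_instance

-- ===== CLAIM (what is proved, stated in full; the proofs are below) =====
def Claim_equal_deletion_distance : Prop := ∀ (str1 : String) (str2 : String), Dom_deletion_distance str1 str2 → Spec_deletion_distance str1 str2 (deletion_distance str1 str2)

-- ===== LEMMAS AND PROOFS =====

-- A's table value as a pure recurrence
def ddCell (cs1 cs2 : List Char) : Nat → Nat → Int
  | 0, j => ordSum (cs2.take j)
  | i+1, 0 => ordSum (cs1.take (i+1))
  | i+1, j+1 =>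
    if cs1.getD i ' ' = cs2.getD j ' ' then ddCell cs1 cs2 i j
    else min (ddCell cs1 cs2 i (j+1) + ((cs1.getD i ' ').toNat : Int))
             (ddCell cs1 cs2 (i+1) j + ((cs2.getD j ' ').toNat : Int))
  termination_by i j => (i, j)

-- B's DP value: the maximum-weight common subsequence of the prefixes
def wlcs (cs1 cs2 : List Char) : Nat → Nat → Int
  | 0, _ => 0
  | _+1, 0 => 0
  | i+1, j+1 =>
    if cs1.getD i ' ' = cs2.getD j ' ' then wlcs cs1 cs2 i j + ((cs1.getD i ' ').toNat : Int)
    else max (wlcs cs1 cs2 i (j+1)) (wlcs cs1 cs2 (i+1) j)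
  termination_by i j => (i, j)

theorem ordSum_take_succ (cs : List Char) (i : Nat) (h : i < cs.length) :
    ordSum (cs.take (i+1)) = ordSum (cs.take i) + ((cs.getD i ' ').toNat : Int) := by
  have h2 : cs.getD i ' ' = cs[i] := List.getD_eq_getElem cs ' ' h
  have h3 : i < (cs.map (fun c => (c.toNat : Int))).length := by simpa using h
  simp only [ordSum, h2]
  rw [List.map_take, List.map_take, List.sum_take_succ _ i h3, List.getElem_map]

-- the duality: A's cell = prefix sums minus twice B's cell
theorem cell_sub (cs1 cs2 : List Char) : ∀ (i j : Nat), i ≤ cs1.length → j ≤ cs2.length →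
    ddCell cs1 cs2 i j = ordSum (cs1.take i) + ordSum (cs2.take j) - 2 * wlcs cs1 cs2 i j
  | 0, j, _, hj => by
    simp [ddCell, wlcs, ordSum]
  | i+1, 0, hi, _ => by
    simp [ddCell, wlcs, ordSum]
  | i+1, j+1, hi, hj => by
    have hi' : i < cs1.length := by omega
    have hj' : j < cs2.length := by omega
    have e1 := ordSum_take_succ cs1 i hi'
    have e2 := ordSum_take_succ cs2 j hj'
    by_cases heq : cs1.getD i ' ' = cs2.getD j ' '
    · have ih := cell_sub cs1 cs2 i j (by omega) (by omega)
      rw [ddCell, if_pos heq, wlcs, if_pos heq, ih, e1, e2, ← heq]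
      ring
    · have ih1 := cell_sub cs1 cs2 i (j+1) (by omega) (by omega)
      have ih2 := cell_sub cs1 cs2 (i+1) j (by omega) (by omega)
      rw [ddCell, if_neg heq, wlcs, if_neg heq, ih1, ih2, e2] at *
      rw [e1]
      omega
  termination_by i j => (i, j)

-- ---------- A's fold equals ddCell (table construction) ----------

theorem valA_spec (cs1 cs2 : List Char) (i j : Nat) (dp : List (List Int))
    (hj : j ≤ cs2.length)
    (hprev : ∀ i0, i = i0 + 1 → ∀ j' ≤ cs2.length, (dp.getD i0 []).getD j' 0 = ddCell cs1 cs2 i0 j')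
    (hcur : ∀ j0, j = j0 + 1 → (dp.getD i []).getD j0 0 = ddCell cs1 cs2 i j0) :
    ddA_val cs1 cs2 dp (i : Int) (j : Int) = ddCell cs1 cs2 i j := by
  match i, j with
  | 0, j =>
    simp [ddA_val, ddCell, PySem.List.slice_to_natCast]
  | i0+1, 0 =>
    have h1 : ((i0+1 : Nat) : Int) ≠ 0 := by positivity
    rw [ddA_val, if_neg h1, Nat.cast_zero, if_pos rfl, PySem.List.slice_to_natCast]
    simp [ddCell]
  | i0+1, j0+1 =>
    have h1 : ((i0+1 : Nat) : Int) ≠ 0 := by positivity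
    have h2 : ((j0+1 : Nat) : Int) ≠ 0 := by positivity
    have e1 : ((i0+1 : Nat) : Int) - 1 = ((i0 : Nat) : Int) := by push_cast; ring
    have e2 : ((j0+1 : Nat) : Int) - 1 = ((j0 : Nat) : Int) := by push_cast; ring
    rw [ddA_val, if_neg h1, if_neg h2, e1, e2]
    simp only [PySem.List.pyGetD_natCast]
    rw [hprev i0 rfl j0 (by omega), hprev i0 rfl (j0+1) (by omega), hcur j0 rfl]
    rw [ddCell]

def stepA (cs1 cs2 : List Char) (dp : List (List Int)) (i j : Nat) : List (List Int) :=
  dp.set i ((dp.getD i []).set j (ddA_val cs1 cs2 dp (i : Int) (j : Int)))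

theorem foldl_set_prefix (f : Nat → Int) (row : List Int) (J : Nat) :
    ((List.range J).foldl (fun r j => r.set j (f j)) row).length = row.length ∧
    ∀ j, ((List.range J).foldl (fun r j => r.set j (f j)) row)[j]? =
      if j < J ∧ j < row.length then some (f j) else row[j]? := by
  induction J with
  | zero => simp
  | succ J ih =>
    rw [List.range_succ, List.foldl_append]
    obtain ⟨ihl, ihg⟩ := ih
    refine ⟨by simp [ihl], ?_⟩
    intro j
    simp only [List.foldl_cons, List.foldl_nil]
    rw [List.getElem?_set, ihl, ihg]
    by_cases hj : J = j
    · subst hj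
      by_cases hl : J < row.length <;> simp [hl]
    · have : ¬ (j < J+1 ∧ j < row.length) ↔ ¬ (j < J ∧ j < row.length) := by
        constructor <;> intro hh <;> omega
      split_ifs with h1 h2 h2 <;> simp_all

theorem innerA (cs1 cs2 : List Char) (i : Nat) (dp : List (List Int))
    (hidp : i < dp.length)
    (hlen : (dp.getD i []).length = cs2.length + 1)
    (hprev : ∀ i0, i = i0 + 1 → ∀ j' ≤ cs2.length, (dp.getD i0 []).getD j' 0 = ddCell cs1 cs2 i0 j') :
    ∀ J, J ≤ cs2.length + 1 →
    (List.range J).foldl (fun dp j => stepA cs1 cs2 dp i j) dp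
      = dp.set i ((List.range J).foldl (fun r j => r.set j (ddCell cs1 cs2 i j)) (dp.getD i [])) := by
  intro J
  induction J with
  | zero =>
    intro _
    simp only [List.range_zero, List.foldl_nil]
    rw [List.getD_eq_getElem?_getD, List.getElem?_eq_getElem hidp]
    exact (List.set_getElem_self hidp).symm
  | succ J ih =>
    intro hJ
    rw [List.range_succ, List.foldl_append, List.foldl_append, ih (by omega)]
    simp only [List.foldl_cons, List.foldl_nil]
    set P := (List.range J).foldl (fun r j => r.set j (ddCell cs1 cs2 i j)) (dp.getD i []) with hP
    have hPget : (dp.set i P).getD i [] = P := by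
      simp [List.getD_eq_getElem?_getD, hidp]
    have hPlen : P.length = cs2.length + 1 := by
      rw [hP, (foldl_set_prefix _ _ _).1, hlen]
    have hval : ddA_val cs1 cs2 (dp.set i P) (i : Int) (J : Int) = ddCell cs1 cs2 i J := by
      apply valA_spec cs1 cs2 i J _ (by omega)
      · intro i0 hi0 j' hj'
        have hrow : (dp.set i P).getD i0 [] = dp.getD i0 [] := by
          rw [List.getD_eq_getElem?_getD (l := dp.set i P),
            List.getElem?_set_ne (by omega : i ≠ i0), ← List.getD_eq_getElem?_getD]
        rw [hrow]
        exact hprev i0 hi0 j' hj'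
      · intro j0 hj0
        rw [hPget, List.getD_eq_getElem?_getD, hP, (foldl_set_prefix _ _ _).2]
        have h1 : j0 < J := by omega
        have h2 : j0 < (dp[i]?.getD []).length := by
          rw [← List.getD_eq_getElem?_getD]; omega
        simp [h1, h2]
    unfold stepA
    rw [hPget, hval, List.set_set]

def InvA (cs1 cs2 : List Char) (I : Nat) (dp : List (List Int)) : Prop :=
  dp.length = cs1.length + 1 ∧
  (∀ i ≤ cs1.length, (dp.getD i []).length = cs2.length + 1) ∧
  (∀ i < I, ∀ j ≤ cs2.length, (dp.getD i []).getD j 0 = ddCell cs1 cs2 i j)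

theorem outerA (cs1 cs2 : List Char) (dp0 : List (List Int)) (h0 : InvA cs1 cs2 0 dp0) :
    ∀ I, I ≤ cs1.length + 1 →
    InvA cs1 cs2 I ((List.range I).foldl
      (fun dp i => (List.range (cs2.length + 1)).foldl (fun dp j => stepA cs1 cs2 dp i j) dp) dp0) := by
  intro I
  induction I with
  | zero => intro _; simpa using h0
  | succ I ih =>
    intro hI
    have inv := ih (by omega)
    set dpI := (List.range I).foldl
      (fun dp i => (List.range (cs2.length + 1)).foldl (fun dp j => stepA cs1 cs2 dp i j) dp) dp0 with hdpI
    obtain ⟨h1, h2, h3⟩ := inv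
    rw [show List.range (I+1) = List.range I ++ [I] from List.range_succ, List.foldl_append]
    simp only [List.foldl_cons, List.foldl_nil]
    rw [innerA cs1 cs2 I dpI (by omega) (h2 I (by omega))
      (fun i0 hi0 j' hj' => h3 i0 (by omega) j' hj') (cs2.length + 1) (by omega)]
    set P := (List.range (cs2.length + 1)).foldl (fun r j => r.set j (ddCell cs1 cs2 I j)) (dpI.getD I []) with hPdef
    have hPlen : P.length = cs2.length + 1 := by
      rw [hPdef, (foldl_set_prefix _ _ _).1, h2 I (by omega)]
    have hIlt : I < dpI.length := by rw [h1]; omega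
    have hIget : (dpI.set I P).getD I [] = P := by
      simp [List.getD_eq_getElem?_getD, hIlt]
    have hother : ∀ i0, i0 ≠ I → (dpI.set I P).getD i0 [] = dpI.getD i0 [] := by
      intro i0 hne
      rw [List.getD_eq_getElem?_getD (l := dpI.set I P),
        List.getElem?_set_ne (by omega : I ≠ i0), ← List.getD_eq_getElem?_getD]
    refine ⟨by simpa using h1, ?_, ?_⟩
    · intro i hi
      by_cases hiI : i = I
      · subst hiI; rw [hIget, hPlen]
      · rw [hother i hiI]; exact h2 i hi
    · intro i hi j hj
      by_cases hiI : i = I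
      · rw [hiI, hIget, List.getD_eq_getElem?_getD, hPdef, (foldl_set_prefix _ _ _).2]
        have hc1 : j < cs2.length + 1 := by omega
        have hc2 : j < (dpI[I]?.getD []).length := by
          rw [← List.getD_eq_getElem?_getD, h2 I (by omega)]; omega
        simp [hc1, hc2]
      · rw [hother i hiI]
        exact h3 i (by omega) j hj

theorem deletion_distance_eq_cell (str1 str2 : String) :
    deletion_distance str1 str2 = ddCell str1.toList str2.toList str1.toList.length str2.toList.length := by
  have hm : ((str1.toList.length : Int) + 1) = ((str1.toList.length + 1 : Nat) : Int) := by push_cast; ring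
  have hn : ((str2.toList.length : Int) + 1) = ((str2.toList.length + 1 : Nat) : Int) := by push_cast; ring
  simp only [deletion_distance, hm, hn, PySem.List.pyRange_zero_natCast, List.foldl_map,
    List.map_map, PySem.List.pySetD_natCast, PySem.List.pyGetD_natCast]
  refine (outerA _ _ _ ⟨?_, ?_, fun i hi => absurd hi (Nat.not_lt_zero i)⟩
      (str1.toList.length + 1) le_rfl).2.2 str1.toList.length (by omega) str2.toList.length le_rfl
  · simp
  · intro i hi
    rw [String.length_toList] at hi
    simp [List.getD_eq_getElem?_getD, List.getElem?_map,
      List.getElem?_range (show i < str1.length + 1 by omega)]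

-- ---------- B's fold equals wlcs (rolling row construction) ----------

theorem enumE (cs : List Char) :
    PySem.List.enumerate cs 0 = (List.range cs.length).map (fun (k : Nat) => ((k : Int), cs.getD k ' ')) := by
  rw [PySem.List.enumerate_eq_map_pyRange (d := ' ')]
  simp only [PySem.List.len_eq, PySem.List.pyRange_zero_natCast, List.map_map]
  apply List.map_congr_left
  intro k _
  simp [Function.comp]

theorem rowW_getD (cs1 cs2 : List Char) (i k : Nat) (hk : k < cs2.length + 1) :
    ((List.range (cs2.length + 1)).map (fun j => wlcs cs1 cs2 i j)).getD k 0 = wlcs cs1 cs2 i k := by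
  rw [List.getD_eq_getElem?_getD, List.getElem?_map, List.getElem?_range hk]
  rfl

theorem innerW (cs1 cs2 : List Char) (c1 : Char) (i : Nat) (hc1 : c1 = cs1.getD i ' ') :
    ∀ K, K ≤ cs2.length →
    ((List.range K).map (fun (k : Nat) => ((k : Int), cs2.getD k ' '))).foldl
      (fun (cur : List Int) x =>
        cur ++ [if c1 = x.2 then
            PySem.List.pyGetD ((List.range (cs2.length + 1)).map (fun j => wlcs cs1 cs2 i j)) x.1 0 + (c1.toNat : Int)
          else max (PySem.List.pyGetD ((List.range (cs2.length + 1)).map (fun j => wlcs cs1 cs2 i j)) (x.1 + 1) 0)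
                   (PySem.List.pyGetD cur x.1 0)])
      [0]
    = (List.range (K+1)).map (fun j => wlcs cs1 cs2 (i+1) j) := by
  intro K
  induction K with
  | zero => simp [wlcs]
  | succ K ih =>
    intro hK
    rw [show List.range (K+1) = List.range K ++ [K] from List.range_succ,
      List.map_append, List.foldl_append, ih (by omega)]
    simp only [List.map_cons, List.map_nil, List.foldl_cons, List.foldl_nil]
    have hK1 : ((K : Int) + 1) = ((K + 1 : Nat) : Int) := by push_cast; ring
    have g1 : PySem.List.pyGetD ((List.range (cs2.length + 1)).map (fun j => wlcs cs1 cs2 i j)) (K : Int) 0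
        = wlcs cs1 cs2 i K := by
      rw [PySem.List.pyGetD_natCast, rowW_getD cs1 cs2 i K (by omega)]
    have g2 : PySem.List.pyGetD ((List.range (cs2.length + 1)).map (fun j => wlcs cs1 cs2 i j)) ((K : Int) + 1) 0
        = wlcs cs1 cs2 i (K+1) := by
      rw [hK1, PySem.List.pyGetD_natCast, rowW_getD cs1 cs2 i (K+1) (by omega)]
    have g3 : PySem.List.pyGetD ((List.range (K+1)).map (fun j => wlcs cs1 cs2 (i+1) j)) (K : Int) 0
        = wlcs cs1 cs2 (i+1) K := by
      rw [PySem.List.pyGetD_natCast, List.getD_eq_getElem?_getD, List.getElem?_map,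
        List.getElem?_range (by omega : K < K + 1)]
      rfl
    rw [g1, g2, g3]
    have hstep : (if c1 = cs2.getD K ' ' then wlcs cs1 cs2 i K + (c1.toNat : Int)
        else max (wlcs cs1 cs2 i (K+1)) (wlcs cs1 cs2 (i+1) K)) = wlcs cs1 cs2 (i+1) (K+1) := by
      rw [wlcs, hc1]
    rw [hstep, show List.range (K+1+1) = List.range (K+1) ++ [K+1] from List.range_succ,
      List.map_append]
    rfl

theorem outerW (cs1 cs2 : List Char) :
    ∀ (l : List Char) (i : Nat), i ≤ cs1.length → cs1.drop i = l →
    l.foldl (fun best c1 =>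
      ((List.range cs2.length).map (fun (k : Nat) => ((k : Int), cs2.getD k ' '))).foldl
        (fun (cur : List Int) x =>
          cur ++ [if c1 = x.2 then PySem.List.pyGetD best x.1 0 + (c1.toNat : Int)
                  else max (PySem.List.pyGetD best (x.1 + 1) 0) (PySem.List.pyGetD cur x.1 0)])
        [0])
      ((List.range (cs2.length + 1)).map (fun j => wlcs cs1 cs2 i j))
    = (List.range (cs2.length + 1)).map (fun j => wlcs cs1 cs2 cs1.length j) := by
  intro l
  induction l with
  | nil =>
    intro i hi hdrop
    have : i = cs1.length := by
      have := List.drop_eq_nil_iff.mp hdrop; omega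
    rw [List.foldl_nil, this]
  | cons c l ih =>
    intro i hi hdrop
    have hilt : i < cs1.length := by
      by_contra h
      rw [List.drop_eq_nil_of_le (by omega)] at hdrop
      simp at hdrop
    rw [List.drop_eq_getElem_cons hilt] at hdrop
    injection hdrop with hc hl
    have hc' : c = cs1.getD i ' ' := by rw [List.getD_eq_getElem cs1 ' ' hilt, hc]
    rw [List.foldl_cons, innerW cs1 cs2 c i hc' cs2.length le_rfl]
    exact ih (i+1) (by omega) hl

theorem deletion_distance_alt_eq (str1 str2 : String) :
    deletion_distance_alt str1 str2
      = ordSum str1.toList + ordSum str2.toList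
        - 2 * wlcs str1.toList str2.toList str1.toList.length str2.toList.length := by
  simp only [deletion_distance_alt]
  have h0 : (List.replicate (str2.toList.length + 1) (0 : Int))
      = (List.range (str2.toList.length + 1)).map (fun j => wlcs str1.toList str2.toList 0 j) := by
    apply List.ext_getElem
    · simp
    · intro k h1 h2
      simp [wlcs]
  rw [enumE, h0, outerW str1.toList str2.toList str1.toList 0 (Nat.zero_le _) List.drop_zero,
    show List.range (str2.toList.length + 1) = List.range str2.toList.length ++ [str2.toList.length]
      from List.range_succ,
    List.map_append, List.map_cons, List.map_nil, PySem.List.pyGetD_neg_one_append_singleton]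

-- ===== VERDICT (by name: the statement is the Claim_ definition above) =====
theorem deletion_distance_spec : Claim_equal_deletion_distance := by
  intro str1 str2 _
  unfold Spec_deletion_distance
  rw [deletion_distance_eq_cell, deletion_distance_alt_eq,
    cell_sub str1.toList str2.toList str1.toList.length str2.toList.length le_rfl le_rfl,
    List.take_length, List.take_length]
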